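-- pv_equiv track=rewrite | github.com/MikitaTsiarentsyeu/highres24 | assignments/24-HR-CS1/homework 9/Koptev Egor/Homework9-1.py | LineSpaceExchange
-- ===== SOURCE A (Python) =====
-- def LineSpaceExchange(words, max_length): #Exchange space between words in one line
--     if len(words) == 1: #If one word in line -> add enough space after it.
--         return words[0].ljust(max_length)
--
--     total_chars = sum(len(word) for word in words) #Number of chars in all words
--     total_spaces = max_length - total_chars #Number of spaces required
--     gaps = len(words) - 1 #Number of gaps between all words
--     space_between = total_spaces // gaps #Exchange space between gaps
--     extra = total_spaces % gaps #Number of remaining spaces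
--
--     justified = ''
--     for gap_index in range(len(words) - 1): #Checking all words except last
--         word = words[gap_index] #Take specific word
--         if gap_index < extra: #Need to add extra space?
--             spaces_to_add = space_between + 1
--         else:
--             spaces_to_add = space_between
--         justified += word + (' ' * spaces_to_add) #Add word and required spaces
--     justified += words[-1] #Add last word without space
--     return justified
-- ===== SOURCE B (Python) =====
-- def LineSpaceExchange(words, max_length):
--     if len(words) == 1:
--         return words[0].ljust(max_length)
--
--     # greedy: each gap takes the ceiling share of the spaces still remaining
--     s = max_length - sum(len(w) for w in words)
--     g = len(words) - 1
--     parts = []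
--     for w in words[:-1]:
--         k = -(-s // g)
--         parts.append(w)
--         parts.append(' ' * k)
--         s -= k
--         g -= 1
--     parts.append(words[-1])
--     return ''.join(parts)
-- ===== Notes on version B (the rewrite author's own statement) =====
-- stated objective: alternative
-- what changed: Replaces A's one-shot divmod (fixed quotient per gap, +1 on the first total%gaps gaps, chosen by an index comparison) with a greedy pass that gives each gap the ceiling share -(-s//g) of the spaces still remaining, updating s and g as it goes; no divmod, no extra counter, no index loop.
import Mathlib
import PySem

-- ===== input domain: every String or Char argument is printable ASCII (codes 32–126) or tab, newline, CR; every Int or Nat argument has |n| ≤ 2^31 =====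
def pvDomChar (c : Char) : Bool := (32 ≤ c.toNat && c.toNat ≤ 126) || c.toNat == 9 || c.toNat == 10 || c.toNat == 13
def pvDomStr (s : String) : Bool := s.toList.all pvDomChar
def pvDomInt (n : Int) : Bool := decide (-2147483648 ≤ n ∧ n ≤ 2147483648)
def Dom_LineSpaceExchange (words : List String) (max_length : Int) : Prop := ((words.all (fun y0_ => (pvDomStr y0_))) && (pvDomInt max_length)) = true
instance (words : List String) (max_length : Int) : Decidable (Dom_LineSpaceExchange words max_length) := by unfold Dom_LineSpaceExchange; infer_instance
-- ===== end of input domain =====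

-- B replaces A's one-shot divmod (quotient + extras on the first total%gaps gaps, per-index
-- conditional) by a greedy single pass: each gap takes the ceiling share of the spaces still
-- remaining; no divmod, no extra counter, no indexing. Objective: alternative.

-- ===== PORT A =====
-- ' ' * n  (empty for n ≤ 0 — exact, toNat clamps negatives to 0, as Python's str * int does)
def pvSpaces (n : Int) : List Char := List.replicate n.toNat ' '

-- A's algorithm on List Char words (strings handled as their code-point lists throughout)
def pvAcore (ws : List (List Char)) (max_length : Int) : List Char :=
  if ws.length = 1 then
    -- words[0].ljust(max_length) = words[0] + ' ' * (max_length - len(words[0])) — exact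
    let w := PySem.List.pyGetD ws 0 []
    w ++ pvSpaces (max_length - w.length)
  else
    let total_chars : Int := (ws.map (fun w => (w.length : Int))).sum
    let total_spaces : Int := max_length - total_chars
    let gaps : Int := (ws.length : Int) - 1
    let space_between := PySem.Int.floordiv total_spaces gaps
    let extra := PySem.Int.mod total_spaces gaps
    let justified :=
      (PySem.List.pyRange 0 ((ws.length : Int) - 1) 1).foldl (fun acc gap_index =>
        let word := PySem.List.pyGetD ws gap_index []
        let spaces_to_add := if gap_index < extra then space_between + 1 else space_between
        acc ++ word ++ pvSpaces spaces_to_add) []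
    justified ++ PySem.List.pyGetD ws (-1) []

def LineSpaceExchange (words : List String) (max_length : Int) : String :=
  String.ofList (pvAcore (words.map String.toList) max_length)

-- ===== PORT B =====
-- one foldl pass over words[:-1] (ported as dropLast — exact), state (parts, s, g);
-- each gap takes k = -(-s // g), the ceiling share of the s spaces still remaining
def pvBcore (ws : List (List Char)) (max_length : Int) : List Char :=
  if ws.length = 1 then
    let w := PySem.List.pyGetD ws 0 []
    w ++ pvSpaces (max_length - w.length)
  else
    let s0 : Int := max_length - (ws.map (fun w => (w.length : Int))).sum
    let st := ws.dropLast.foldl (fun (acc : List (List Char) × Int × Int) w =>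
        let k := -(PySem.Int.floordiv (-acc.2.1) acc.2.2)
        (acc.1 ++ [w, pvSpaces k], acc.2.1 - k, acc.2.2 - 1))
      ([], s0, (ws.length : Int) - 1)
    PySem.Chars.join [] (st.1 ++ [PySem.List.pyGetD ws (-1) []])

def LineSpaceExchange_alt (words : List String) (max_length : Int) : String :=
  String.ofList (pvBcore (words.map String.toList) max_length)

-- ===== PRECONDITION & SPEC =====
-- Pre_ excludes only the empty word list, on which both Pythons raise IndexError (words[-1] / ws[0]).
def Pre_LineSpaceExchange (words : List String) (max_length : Int) : Prop := words ≠ []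
instance (words : List String) (max_length : Int) : Decidable (Pre_LineSpaceExchange words max_length) := by unfold Pre_LineSpaceExchange; infer_instance
def pvWitness_LineSpaceExchange : List String × Int := (["ab", "c", "de"], 12)

def Spec_LineSpaceExchange (words : List String) (max_length : Int) (out : String) : Prop := out = LineSpaceExchange_alt words max_length
instance (words : List String) (max_length : Int) (out : String) : Decidable (Spec_LineSpaceExchange words max_length out) := by unfold Spec_LineSpaceExchange; infer_instance

-- ===== CLAIM (what is proved, stated in full; the proofs are below) =====
def Claim_equal_LineSpaceExchange : Prop := ∀ (words : List String) (max_length : Int), Dom_LineSpaceExchange words max_length → Pre_LineSpaceExchange words max_length → Spec_LineSpaceExchange words max_length (LineSpaceExchange words max_length)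

-- ===== LEMMAS AND PROOFS =====

-- the greedy recursion B's foldl implements, as a structural recursion (proof helper)
def pvGo : List (List Char) → Int → List Char
  | [], _ => []
  | [w], _ => w
  | w :: rest@(_ :: _), s =>
      let k := -(PySem.Int.floordiv (-s) (rest.length : Int))
      w ++ pvSpaces k ++ pvGo rest (s - k)

-- ''.join of pieces is flatten
theorem pvJoin_nil_eq_flatten (l : List (List Char)) :
    PySem.Chars.join [] l = l.flatten := by
  induction l with
  | nil => simp [PySem.Chars.join, List.intercalate]
  | cons x xs ih =>
    cases xs with
    | nil => simp [PySem.Chars.join, List.intercalate]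
    | cons y ys => simpa [PySem.Chars.join_cons_cons] using ih

-- B's foldl with any prefix accumulator computes the greedy recursion pvGo
theorem pvFold_eq_go (ws : List (List Char)) (acc : List (List Char)) (s : Int) (h : ws ≠ []) :
    ((ws.dropLast.foldl (fun (acc : List (List Char) × Int × Int) w =>
        let k := -(PySem.Int.floordiv (-acc.2.1) acc.2.2)
        (acc.1 ++ [w, pvSpaces k], acc.2.1 - k, acc.2.2 - 1))
      (acc, s, (ws.length : Int) - 1)).1 ++ [PySem.List.pyGetD ws (-1) []]).flatten
      = acc.flatten ++ pvGo ws s := by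
  induction ws generalizing acc s with
  | nil => simp at h
  | cons w rest ih =>
    cases rest with
    | nil =>
      simp [pvGo, PySem.List.pyGetD_neg_one [w] ([] : List Char) (by simp)]
    | cons w2 rest2 =>
      have hne : (w2 :: rest2 : List (List Char)) ≠ [] := by simp
      have hdl : (w :: w2 :: rest2 : List (List Char)).dropLast = w :: (w2 :: rest2).dropLast := by
        simp [List.dropLast_cons_of_ne_nil hne]
      have hlast : PySem.List.pyGetD (w :: w2 :: rest2) (-1) ([] : List Char)
          = PySem.List.pyGetD (w2 :: rest2) (-1) ([] : List Char) := by
        rw [PySem.List.pyGetD_neg_one _ _ (by simp : (w :: w2 :: rest2 : List (List Char)) ≠ []), PySem.List.pyGetD_neg_one _ _ hne]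
        exact List.getLast_cons hne
      rw [hdl, List.foldl_cons, hlast]
      have hstep := ih (acc ++ [w, pvSpaces (-(PySem.Int.floordiv (-s) ((w :: w2 :: rest2 : List (List Char)).length - 1)))])
        (s - -(PySem.Int.floordiv (-s) ((w :: w2 :: rest2 : List (List Char)).length - 1))) hne
      simp only [List.length_cons] at hstep ⊢
      push_cast at hstep ⊢
      rw [show ((rest2.length : Int) + 1 + 1 - 1 - 1) = (rest2.length : Int) + 1 - 1 by ring] at *
      rw [hstep]
      simp [pvGo, List.append_assoc]

-- A's per-gap space amounts as a list: the floor quotient, +1 on the first `total % gaps` gaps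
def pvAmts (g : Nat) (s : Int) : List Int :=
  (List.range g).map (fun (i : Nat) =>
    if (i : Int) < PySem.Int.mod s (g : Int) then PySem.Int.floordiv s (g : Int) + 1
    else PySem.Int.floordiv s (g : Int))

theorem pvAmts_cons (g : Nat) (s : Int) (hg : 1 ≤ g) :
    pvAmts g s = -(PySem.Int.floordiv (-s) (g : Int)) ::
      pvAmts (g - 1) (s - -(PySem.Int.floordiv (-s) (g : Int))) := by
  have hg' : (0:Int) < (g:Int) := by exact_mod_cast hg
  have hqr : PySem.Int.floordiv s (g:Int) * (g:Int) + PySem.Int.mod s (g:Int) = s :=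
    PySem.Int.floordiv_mul_add_mod s (g:Int)
  have h0 : 0 ≤ PySem.Int.mod s (g:Int) := PySem.Int.mod_nonneg s hg'
  have h1 : PySem.Int.mod s (g:Int) < (g:Int) := PySem.Int.mod_lt s hg'
  have hk : -(PySem.Int.floordiv (-s) (g:Int)) =
      (if 0 < PySem.Int.mod s (g:Int) then PySem.Int.floordiv s (g:Int) + 1
       else PySem.Int.floordiv s (g:Int)) := by
    rw [PySem.Int.neg_floordiv_neg_eq_iff_of_pos hg']
    split_ifs with h <;> constructor <;> nlinarith
  generalize hQ : PySem.Int.floordiv s (g:Int) = q at hqr hk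
  generalize hR : PySem.Int.mod s (g:Int) = r at h0 h1 hqr hk
  obtain ⟨g0, rfl⟩ : ∃ g0, g = g0 + 1 := ⟨g - 1, by omega⟩
  rw [hk]
  unfold pvAmts
  rw [List.range_succ_eq_map]
  simp only [List.map_cons, List.map_map, Nat.add_sub_cancel, hQ, hR]
  congr 1
  rcases Nat.eq_zero_or_pos g0 with h | hpos
  · subst h; simp
  · have hg0' : (0:Int) < (g0:Int) := by exact_mod_cast hpos
    push_cast at hqr h1
    by_cases hb : 0 < r
    · rw [if_pos hb]
      have hq' : PySem.Int.floordiv (s - (q + 1)) (g0:Int) = q := by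
        rw [PySem.Int.floordiv_eq_iff_of_pos hg0']
        constructor <;> nlinarith
      have hr' : PySem.Int.mod (s - (q + 1)) (g0:Int) = r - 1 := by
        have h2 := PySem.Int.floordiv_mul_add_mod (s - (q + 1)) (g0:Int)
        rw [hq'] at h2; linarith
      apply List.map_congr_left
      intro i _
      simp only [Function.comp_apply, hq', hr']
      push_cast
      split_ifs <;> first | rfl | omega
    · rw [if_neg hb]
      have hr0 : r = 0 := by omega
      have hq' : PySem.Int.floordiv (s - q) (g0:Int) = q := by
        rw [PySem.Int.floordiv_eq_iff_of_pos hg0']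
        constructor <;> nlinarith
      have hr' : PySem.Int.mod (s - q) (g0:Int) = 0 := by
        have h2 := PySem.Int.floordiv_mul_add_mod (s - q) (g0:Int)
        rw [hq'] at h2; linarith
      apply List.map_congr_left
      intro i _
      simp only [Function.comp_apply, hq', hr']
      push_cast
      split_ifs <;> first | rfl | omega

-- pvGo interleaves the words with exactly A's per-gap amounts
theorem pvGo_eq (ws : List (List Char)) (s : Int) (h : ws ≠ []) :
    pvGo ws s =
      ((ws.zip ((pvAmts (ws.length - 1) s).map pvSpaces)).map (fun p => p.1 ++ p.2)).flatten
        ++ PySem.List.pyGetD ws (-1) [] := by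
  induction ws generalizing s with
  | nil => simp at h
  | cons w rest ih =>
    cases rest with
    | nil =>
      simp [pvGo, pvAmts, PySem.List.pyGetD_neg_one [w] ([] : List Char) (by simp)]
    | cons w2 rest2 =>
      have hne : (w2 :: rest2 : List (List Char)) ≠ [] := by simp
      rw [pvAmts_cons _ _ (by simp)]
      simp only [pvGo, List.map_cons, List.zip_cons_cons, List.flatten_cons]
      rw [ih _ hne]
      have hlast : PySem.List.pyGetD (w :: w2 :: rest2) (-1) ([] : List Char)
          = PySem.List.pyGetD (w2 :: rest2) (-1) ([] : List Char) := by
        rw [PySem.List.pyGetD_neg_one _ _ (by simp : (w :: w2 :: rest2 : List (List Char)) ≠ []), PySem.List.pyGetD_neg_one _ _ hne]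
        exact List.getLast_cons hne
      rw [hlast]
      simp [List.length_cons, List.append_assoc]

theorem pvCore_eq (ws : List (List Char)) (max_length : Int) (hws : ws ≠ []) :
    pvAcore ws max_length = pvBcore ws max_length := by
  unfold pvAcore pvBcore
  by_cases h1 : ws.length = 1
  · simp [h1]
  · have hL : 2 ≤ ws.length := by
      have := List.length_pos_iff.mpr hws; omega
    simp only [if_neg h1]
    set s := max_length - (ws.map (fun w => (w.length : Int))).sum with hs
    rw [pvJoin_nil_eq_flatten, pvFold_eq_go ws [] s hws, List.flatten_nil, List.nil_append, pvGo_eq ws s hws]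
    simp only [List.append_assoc, List.foldl_append_eq_append, List.nil_append]
    congr 2
    have hcast : ((ws.length - 1 : Nat) : Int) = (ws.length : Int) - 1 := by omega
    apply List.ext_getElem
    · simp [PySem.List.length_pyRange_one, pvAmts]
    · intro i hi1 hi2
      have hi : i < ws.length - 1 := by
        simp [PySem.List.length_pyRange_one] at hi1; omega
      have hiw : i < ws.length := by omega
      have hia : i < (pvAmts (ws.length - 1) s).length := by simp [pvAmts]; omega
      simp only [List.getElem_map, List.getElem_zip, PySem.List.getElem_pyRange_one, zero_add]
      have hget : PySem.List.pyGetD ws (i : Int) [] = ws[i] := by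
        simp [PySem.List.pyGetD_natCast, hiw]
      rw [hget]
      congr 1
      simp only [List.getElem_map, pvAmts, List.getElem_range]
      rw [hcast]

-- ===== VERDICT (by name: the statement is the Claim_ definition above) =====
theorem LineSpaceExchange_spec : Claim_equal_LineSpaceExchange := by
  intro words max_length _ hpre
  unfold Spec_LineSpaceExchange LineSpaceExchange LineSpaceExchange_alt
  rw [pvCore_eq]
  simpa using hpre
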